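-- pv_equiv track=rewrite | github.com/JMVCoelho/tevatron | scripts/build_datamodel_dataset.py | to_binary_labels
-- ===== SOURCE A (Python) =====
-- def to_binary_labels(lst):
--     smallest_values = sorted(lst)[:2]
--
--     for i in range(len(lst)):
--         if lst[i] in smallest_values:
--             lst[i] = 1
--         else:
--             lst[i] = 0
--
--     return lst
-- ===== SOURCE B (Python) =====
-- def to_binary_labels(lst):
--     # One linear pass tracks the two smallest values (with multiplicity),
--     # then one pass relabels in place (same mutation as A).
--     m1 = m2 = None
--     for x in lst:
--         if m1 is None or x < m1:
--             m1, m2 = x, m1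
--         elif m2 is None or x < m2:
--             m2 = x
--     for i in range(len(lst)):
--         lst[i] = 1 if lst[i] == m1 or lst[i] == m2 else 0
--     return lst
-- ===== Notes on version B (the rewrite author's own statement) =====
-- stated objective: faster
-- what changed: Replaced sort-then-slice with a single linear pass that tracks the two smallest values, then one labeling pass.
import Mathlib
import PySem

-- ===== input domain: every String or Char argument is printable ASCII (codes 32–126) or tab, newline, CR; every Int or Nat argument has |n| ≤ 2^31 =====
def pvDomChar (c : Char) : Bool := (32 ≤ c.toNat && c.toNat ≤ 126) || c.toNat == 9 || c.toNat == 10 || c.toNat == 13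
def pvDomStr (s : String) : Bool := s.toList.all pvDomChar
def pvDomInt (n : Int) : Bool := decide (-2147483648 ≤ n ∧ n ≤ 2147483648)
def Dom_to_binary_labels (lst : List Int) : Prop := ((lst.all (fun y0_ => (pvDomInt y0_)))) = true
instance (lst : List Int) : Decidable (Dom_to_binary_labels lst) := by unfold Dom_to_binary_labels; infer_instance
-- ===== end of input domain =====

-- B replaces A's sort-and-slice with one linear pass tracking the two smallest values (faster).
-- A mutates its argument in place; the equivalence proved here is about the return value only.

-- ===== PORT A =====
-- sorted(lst)[:2], then each element is overwritten with 1 if it is in that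
-- slice else 0 (the in-place index loop over range(len(lst)) reads lst[i]
-- before writing it and tests against the pre-computed slice, so it is the
-- element-wise replacement written here).
def to_binary_labels (lst : List Int) : List Int :=
  let smallest_values := PySem.List.slice (PySem.List.sorted lst (fun x => x) false) none (some 2)
  lst.map (fun x => if x ∈ smallest_values then 1 else 0)

-- ===== PORT B =====
-- the first loop: fold carrying (m1, m2), both Optional
def tblStep (p : Option Int × Option Int) (x : Int) : Option Int × Option Int :=
  match p with
  | (none, m2) => (some x, m2)
  | (some a, m2) =>
    if x < a then (some x, some a)
    else match m2 with
      | none => (some a, some x)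
      | some b => if x < b then (some a, some x) else (some a, some b)

def to_binary_labels_alt (lst : List Int) : List Int :=
  let ms := lst.foldl tblStep (none, none)
  lst.map (fun x => if some x = ms.1 || some x = ms.2 then 1 else 0)

-- ===== PRECONDITION & SPEC =====
def Spec_to_binary_labels (lst : List Int) (out : List Int) : Prop := out = to_binary_labels_alt lst
instance (lst : List Int) (out : List Int) : Decidable (Spec_to_binary_labels lst out) := by unfold Spec_to_binary_labels; infer_instance

-- ===== CLAIM (what is proved, stated in full; the proofs are below) =====
def Claim_equal_to_binary_labels : Prop := ∀ (lst : List Int), Dom_to_binary_labels lst → Spec_to_binary_labels lst (to_binary_labels lst)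

-- ===== LEMMAS AND PROOFS =====

-- state abstraction: the pair (first, second) of a sorted accumulator
def tblState : List Int → Option Int × Option Int
  | [] => (none, none)
  | [a] => (some a, none)
  | a :: b :: _ => (some a, some b)

theorem tblState_insertBy (acc : List Int) (x : Int) :
    tblState (PySem.List.insertBy (fun a b => decide (a < b)) x acc) = tblStep (tblState acc) x := by
  match acc with
  | [] => simp [PySem.List.insertBy, tblState, tblStep]
  | [a] =>
    by_cases h : x < a <;> simp [PySem.List.insertBy, tblState, tblStep, h]
  | a :: b :: t =>
    by_cases h : x < a
    · simp [PySem.List.insertBy, tblState, tblStep, h]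
    · by_cases h2 : x < b <;> simp [PySem.List.insertBy, tblState, tblStep, h, h2]

theorem tblFold_eq (l : List Int) (acc : List Int) :
    l.foldl tblStep (tblState acc) =
      tblState (l.foldl (fun acc x => PySem.List.insertBy (fun a b => decide (a < b)) x acc) acc) := by
  induction l generalizing acc with
  | nil => rfl
  | cons x t ih =>
    simp only [List.foldl_cons, ← tblState_insertBy acc x]
    exact ih _

theorem tblFold_sorted (lst : List Int) :
    lst.foldl tblStep (none, none) = tblState (PySem.List.sorted lst (fun x => x) false) := by
  rw [PySem.List.sorted_eq_foldl_insertBy]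
  exact tblFold_eq lst []

theorem mem_take2_iff (s : List Int) (x : Int) :
    (x ∈ s.take 2) ↔ (some x = (tblState s).1 ∨ some x = (tblState s).2) := by
  match s with
  | [] => simp [tblState]
  | [a] => simp [tblState]
  | a :: b :: t => simp [tblState, or_assoc, eq_comm]
-- ===== VERDICT (by name: the statement is the Claim_ definition above) =====
theorem to_binary_labels_spec : Claim_equal_to_binary_labels := by
  intro lst _
  unfold Spec_to_binary_labels to_binary_labels to_binary_labels_alt
  rw [tblFold_sorted]
  apply List.map_congr_left
  intro x _
  rw [show (2:Int) = ((2:Nat):Int) from rfl, PySem.List.slice_to_natCast]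
  by_cases h : x ∈ (PySem.List.sorted lst (fun x => x) false).take 2
  · simp only [h, if_true]
    rcases (mem_take2_iff _ x).mp h with h' | h' <;> simp [← h']
  · simp only [h, if_false]
    rw [mem_take2_iff] at h
    push_neg at h
    simp [h.1, h.2]
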